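-- pv_equiv track=rewrite | github.com/ro-berto/build | recipes/recipe_modules/flaky_reproducer/libs/test_binary/utils.py | strip_command_switches
-- ===== SOURCE A (Python) =====
-- def strip_command_switches(command, strip_switches):
--   """Strip specified switches and its value.
--
--   Args:
--     strip_switches (map[str, int]): Map of switch name and number of values it's
--       expecting.
--
--   Returns:
--     A copy of command without strip_switches and their values.
--   """
--   cmd = []
--   # strip switch with value like: --switch value
--   strip_next_arg = 0
--   for arg in command:
--     if arg.startswith('--'):
--       if '=' in arg:
--         switch, value = arg.split('=', 1)
--       else:
--         switch, value = arg, None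
--       switch = switch.strip('- ').lower()
--
--       if switch in strip_switches:
--         strip_next_arg = 0 if value else strip_switches[switch]
--       else:
--         strip_next_arg = 0  # Reset when accepting a new switch.
--         cmd.append(arg)
--     elif strip_next_arg:
--       strip_next_arg -= 1
--     else:
--       cmd.append(arg)
--   return cmd
-- ===== SOURCE B (Python) =====
-- def strip_command_switches(command, strip_switches):
--   """Strip specified switches and their values (index-based scan)."""
--   cmd = []
--   i = 0
--   n = len(command)
--   while i < n:
--     arg = command[i]
--     i += 1
--     if arg.startswith('--'):
--       if '=' in arg:
--         switch, value = arg.split('=', 1)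
--       else:
--         switch, value = arg, None
--       switch = switch.strip('- ').lower()
--       if switch in strip_switches:
--         if not value:
--           # consume the following value arguments, stopping at any '--' argument
--           k = strip_switches[switch]
--           while k != 0 and i < n and not command[i].startswith('--'):
--             i += 1
--             k -= 1
--       else:
--         cmd.append(arg)
--     else:
--       cmd.append(arg)
--   return cmd
-- ===== Notes on version B (the rewrite author's own statement) =====
-- stated objective: alternative
-- what changed: Replaces the single for-loop carrying a strip_next_arg counter across iterations with an index-based scan whose matching bare switch triggers an inner loop that consumes the following value arguments directly (stopping at any '--' argument), so no counter state crosses outer iterations.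
import Mathlib
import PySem

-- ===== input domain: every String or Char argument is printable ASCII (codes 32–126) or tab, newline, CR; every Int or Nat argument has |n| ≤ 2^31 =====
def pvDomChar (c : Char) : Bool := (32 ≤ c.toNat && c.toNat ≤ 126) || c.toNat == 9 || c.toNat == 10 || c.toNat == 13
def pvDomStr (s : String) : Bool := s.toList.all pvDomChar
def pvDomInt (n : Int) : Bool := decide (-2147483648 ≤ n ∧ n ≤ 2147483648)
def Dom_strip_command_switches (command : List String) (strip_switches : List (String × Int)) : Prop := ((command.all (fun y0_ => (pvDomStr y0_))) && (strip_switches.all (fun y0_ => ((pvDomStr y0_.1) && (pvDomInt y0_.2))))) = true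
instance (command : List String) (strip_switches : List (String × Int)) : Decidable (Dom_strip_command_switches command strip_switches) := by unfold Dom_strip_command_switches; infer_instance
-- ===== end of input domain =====

-- B replaces A's cross-iteration strip_next_arg counter with an index-based scan whose matching
-- bare switch consumes its value arguments in an inner loop (objective: alternative decomposition).

-- ===== PORT A =====
-- parse '--switch[=value]' : (switch-part, None-or-value), per "if '=' in arg: split('=',1)"
-- (these lines are identical in Source A and Source B, so both ports use this helper)
def pvParseA (arg : String) : String × Option String :=
  if PySem.Str.isIn "=" arg then
    let parts := (PySem.Str.splitMax? arg "=" 1).getD []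
    (parts.headD "", parts[1]?)
  else (arg, none)

-- one iteration of A's for-loop over state (cmd, strip_next_arg)
def pvStepA (strip_switches : List (String × Int)) (st : List String × Int) (arg : String) : List String × Int :=
  if PySem.Str.startswith arg "--" then
    let pr := pvParseA arg
    let switch := PySem.Str.lower (PySem.Str.stripChars pr.1 "- ")
    match strip_switches.lookup switch with
    | some kv => (st.1, if pr.2 = none ∨ pr.2 = some "" then kv else 0)
    | none => (st.1 ++ [arg], 0)
  else if st.2 ≠ 0 then (st.1, st.2 - 1)
  else (st.1 ++ [arg], st.2)

def strip_command_switches (command : List String) (strip_switches : List (String × Int)) : List String :=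
  (command.foldl (pvStepA strip_switches) ([], 0)).1

-- ===== PORT B =====
-- Source B's inner while loop: consume value arguments, stopping at any '--' argument
def pvSkipB (k : Int) : List String → List String
  | [] => []
  | a :: r => if k ≠ 0 ∧ PySem.Str.startswith a "--" = false then pvSkipB (k - 1) r else a :: r

theorem pvSkipB_length_le (k : Int) (l : List String) : (pvSkipB k l).length ≤ l.length := by
  induction l generalizing k with
  | nil => simp [pvSkipB]
  | cons a r ih =>
    simp only [pvSkipB]
    split
    · exact Nat.le_succ_of_le (ih _)
    · simp

-- Source B's outer while loop over the remaining arguments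
def pvGoB (strip_switches : List (String × Int)) (acc : List String) : List String → List String
  | [] => acc
  | arg :: rest =>
    if PySem.Str.startswith arg "--" then
      let pr := pvParseA arg
      let switch := PySem.Str.lower (PySem.Str.stripChars pr.1 "- ")
      match strip_switches.lookup switch with
      | some kv =>
        if pr.2 = none ∨ pr.2 = some "" then pvGoB strip_switches acc (pvSkipB kv rest)
        else pvGoB strip_switches acc rest
      | none => pvGoB strip_switches (acc ++ [arg]) rest
    else pvGoB strip_switches (acc ++ [arg]) rest
  termination_by l => l.length
  decreasing_by
  · exact Nat.lt_succ_of_le (pvSkipB_length_le _ _)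
  · simp
  · simp
  · simp

def strip_command_switches_alt (command : List String) (strip_switches : List (String × Int)) : List String :=
  pvGoB strip_switches [] command

-- ===== PRECONDITION & SPEC =====
def Spec_strip_command_switches (command : List String) (strip_switches : List (String × Int)) (out : List String) : Prop := out = strip_command_switches_alt command strip_switches
instance (command : List String) (strip_switches : List (String × Int)) (out : List String) : Decidable (Spec_strip_command_switches command strip_switches out) := by unfold Spec_strip_command_switches; infer_instance

-- ===== CLAIM (what is proved, stated in full; the proofs are below) =====
def Claim_equal_strip_command_switches : Prop := ∀ (command : List String) (strip_switches : List (String × Int)), Dom_strip_command_switches command strip_switches → Spec_strip_command_switches command strip_switches (strip_command_switches command strip_switches)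

-- ===== LEMMAS AND PROOFS =====
theorem pvSkipB_zero (l : List String) : pvSkipB 0 l = l := by
  cases l with
  | nil => rfl
  | cons a r => simp [pvSkipB]

theorem pvGoB_eq_foldl (strip_switches : List (String × Int)) :
    ∀ (l : List String) (acc : List String) (k : Int),
      (l.foldl (pvStepA strip_switches) (acc, k)).1 = pvGoB strip_switches acc (pvSkipB k l) := by
  intro l
  induction l with
  | nil => intro acc k; simp only [pvSkipB, pvGoB, List.foldl_nil]
  | cons a rest ih =>
    intro acc k
    by_cases h : PySem.Str.startswith a "--" = true
    · have hcond : ¬ (k ≠ 0 ∧ PySem.Str.startswith a "--" = false) := by rw [h]; simp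
      have hskip : pvSkipB k (a :: rest) = a :: rest := by
        simp only [pvSkipB]; rw [if_neg hcond]
      rw [hskip, List.foldl_cons]
      simp only [pvGoB, pvStepA, h, if_true]
      cases hlk : strip_switches.lookup (PySem.Str.lower (PySem.Str.stripChars (pvParseA a).1 "- ")) with
      | some kv =>
        simp only []
        by_cases hv : (pvParseA a).2 = none ∨ (pvParseA a).2 = some ""
        · rw [if_pos hv, if_pos hv]
          exact ih acc kv
        · rw [if_neg hv, if_neg hv, ih acc 0, pvSkipB_zero]
      | none =>
        simp only []
        rw [ih (acc ++ [a]) 0, pvSkipB_zero]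
    · have h' : PySem.Str.startswith a "--" = false := by
        cases hb : PySem.Str.startswith a "--" <;> simp_all
      rw [List.foldl_cons]
      by_cases hk : k ≠ 0
      · have hskip : pvSkipB k (a :: rest) = pvSkipB (k - 1) rest := by
          simp only [pvSkipB]; rw [if_pos ⟨hk, h'⟩]
        rw [hskip]
        simp only [pvStepA, h', Bool.false_eq_true, if_false]
        rw [if_pos hk]
        exact ih acc (k - 1)
      · have hk0 : k = 0 := by omega
        subst hk0
        rw [pvSkipB_zero]
        simp only [pvGoB, pvStepA, h', Bool.false_eq_true, if_false, ne_eq,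
          not_true_eq_false]
        rw [ih (acc ++ [a]) 0, pvSkipB_zero]

-- ===== VERDICT (by name: the statement is the Claim_ definition above) =====
theorem strip_command_switches_spec : Claim_equal_strip_command_switches := by
  intro command strip_switches _
  unfold Spec_strip_command_switches strip_command_switches strip_command_switches_alt
  rw [pvGoB_eq_foldl strip_switches command [] 0, pvSkipB_zero]
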